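-- pv_equiv track=rewrite | github.com/omarfoud/bookstore-erp-system | upgrade_chooser.py | choose_upgrade
-- ===== SOURCE A (Python) =====
-- def choose_upgrade(preferred, blacklisted, options):
--     """
--     Choose which upgrade option to take based on a decision hierarchy.
--
--     Args:
--         preferred: set of strings (preferred skills)
--         blacklisted: set of strings (blacklisted skills)
--         options: tuple of 3 pairs (skill, percentage) for options A, B, C
--
--     Returns:
--         str: "A", "B", "C", or "D" (for money)
--     """
--
--     # Map options to letters
--     option_letters = ["A", "B", "C"]
--
--     # Filter out blacklisted options
--     valid_options = []
--     for i, (skill, percentage) in enumerate(options):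
--         if skill not in blacklisted:
--             valid_options.append((option_letters[i], skill, percentage))
--
--     # If all options are blacklisted, return D
--     if not valid_options:
--         return "D"
--
--     # Step 1: Look for preferred skills among valid options
--     preferred_options = [opt for opt in valid_options if opt[1] in preferred]
--     if preferred_options:
--         # Choose the one with highest percentage
--         return max(preferred_options, key=lambda x: x[2])[0]
--
--     # Step 2: No preferred options, so choose neutral (valid but not preferred) with highest percentage
--     return max(valid_options, key=lambda x: x[2])[0]
-- ===== SOURCE B (Python) =====
-- def choose_upgrade(preferred, blacklisted, options):
--     """Single pass over the lettered options, keeping two running bests."""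
--     best_pref = None   # (letter, percentage) of best preferred valid option
--     best_any = None    # (letter, percentage) of best valid option
--     for letter, (skill, percentage) in zip("ABC", options):
--         if skill in blacklisted:
--             continue
--         if best_any is None or percentage > best_any[1]:
--             best_any = (letter, percentage)
--         if skill in preferred and (best_pref is None or percentage > best_pref[1]):
--             best_pref = (letter, percentage)
--     if best_pref is not None:
--         return best_pref[0]
--     if best_any is not None:
--         return best_any[0]
--     return "D"
-- ===== Notes on version B (the rewrite author's own statement) =====
-- stated objective: simpler
-- what changed: Replaced the build-filtered-list + preferred-sublist + two max() scans with a single pass over zip('ABC', options) maintaining two running bests (best preferred, best valid) with strict '>' so ties keep the earliest option.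
import Mathlib
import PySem

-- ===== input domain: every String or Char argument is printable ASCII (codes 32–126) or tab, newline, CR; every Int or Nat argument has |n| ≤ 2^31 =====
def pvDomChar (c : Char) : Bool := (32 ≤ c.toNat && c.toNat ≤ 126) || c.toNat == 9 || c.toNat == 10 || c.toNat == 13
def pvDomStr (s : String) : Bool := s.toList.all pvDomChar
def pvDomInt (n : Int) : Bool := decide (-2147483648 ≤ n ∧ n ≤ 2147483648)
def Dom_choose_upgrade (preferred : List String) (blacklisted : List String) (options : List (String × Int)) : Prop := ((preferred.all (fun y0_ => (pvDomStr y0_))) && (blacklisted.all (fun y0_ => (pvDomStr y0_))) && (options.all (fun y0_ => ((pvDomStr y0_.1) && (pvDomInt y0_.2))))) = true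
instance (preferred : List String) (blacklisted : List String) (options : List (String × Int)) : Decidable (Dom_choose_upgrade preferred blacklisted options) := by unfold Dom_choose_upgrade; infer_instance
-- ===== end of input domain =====

-- B replaces A's filtered-list construction, preferred sublist and two max() scans by one fold over
-- zip ["A","B","C"] options keeping two running bests; equivalence of return values is proved on Pre_.

-- ===== PORT A =====
def choose_upgrade (preferred : List String) (blacklisted : List String) (options : List (String × Int)) : String :=
  let option_letters : List String := ["A", "B", "C"]
  let valid_options : List (String × String × Int) :=
    (PySem.List.enumerate options).foldl
      (fun acc p =>
        if ¬ blacklisted.contains p.2.1 then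
          -- option_letters[i]: Python raises IndexError when i ≥ 3; exactly those inputs are excluded by Pre_,
          -- so the .getD "" default is never reached on admitted inputs
          acc ++ [(((PySem.List.pyGet? option_letters p.1).getD ""), p.2.1, p.2.2)]
        else acc) []
  if valid_options = [] then "D"
  else
    let preferred_options := valid_options.filter (fun opt => preferred.contains opt.2.1)
    if preferred_options ≠ [] then
      ((PySem.List.max? preferred_options (fun x => x.2.2)).getD ("", "", 0)).1
    else
      ((PySem.List.max? valid_options (fun x => x.2.2)).getD ("", "", 0)).1

-- ===== PORT B =====
-- B-side helper: the body of Source B's single for-loop (two running bests, strict > so the first tie wins)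
def pvBStep (preferred : List String) (blacklisted : List String)
    (st : Option (String × Int) × Option (String × Int)) (q : String × (String × Int)) :
    Option (String × Int) × Option (String × Int) :=
  let letter := q.1
  let skill := q.2.1
  let pct := q.2.2
  if blacklisted.contains skill then st
  else
    let best_any : Option (String × Int) :=
      match st.2 with
      | none => some (letter, pct)
      | some b => if pct > b.2 then some (letter, pct) else some b
    let best_pref : Option (String × Int) :=
      if preferred.contains skill then
        match st.1 with
        | none => some (letter, pct)
        | some b => if pct > b.2 then some (letter, pct) else some b
      else st.1
    (best_pref, best_any)

def choose_upgrade_alt (preferred : List String) (blacklisted : List String) (options : List (String × Int)) : String :=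
  let res : Option (String × Int) × Option (String × Int) :=
    (List.zip ["A", "B", "C"] options).foldl (pvBStep preferred blacklisted) (none, none)
  match res.1 with
  | some b => b.1
  | none =>
    match res.2 with
    | some b => b.1
    | none => "D"

-- ===== PRECONDITION & SPEC =====
-- Pre_ excludes exactly the inputs where A raises IndexError (option_letters[i] with only three letters):
-- a non-blacklisted skill at option index 3 or beyond. A returns normally on every other input.
def Pre_choose_upgrade (preferred : List String) (blacklisted : List String) (options : List (String × Int)) : Prop :=
  ∀ p ∈ options.drop 3, blacklisted.contains p.1 = true
instance (preferred : List String) (blacklisted : List String) (options : List (String × Int)) : Decidable (Pre_choose_upgrade preferred blacklisted options) := by unfold Pre_choose_upgrade; infer_instance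

def pvWitness_choose_upgrade : List String × List String × (List (String × Int)) :=
  (["b"], ["c"], [("a", 3), ("b", 5), ("c", 9)])

def Spec_choose_upgrade (preferred : List String) (blacklisted : List String) (options : List (String × Int)) (out : String) : Prop := out = choose_upgrade_alt preferred blacklisted options
instance (preferred : List String) (blacklisted : List String) (options : List (String × Int)) (out : String) : Decidable (Spec_choose_upgrade preferred blacklisted options out) := by unfold Spec_choose_upgrade; infer_instance

-- ===== CLAIM (what is proved, stated in full; the proofs are below) =====
def Claim_equal_choose_upgrade : Prop := ∀ (preferred : List String) (blacklisted : List String) (options : List (String × Int)), Dom_choose_upgrade preferred blacklisted options → Pre_choose_upgrade preferred blacklisted options → Spec_choose_upgrade preferred blacklisted options (choose_upgrade preferred blacklisted options)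


-- ===== LEMMAS AND PROOFS =====

def pvValid1 (blacklisted : List String) (q : String × (String × Int)) : Option (String × String × Int) :=
  if blacklisted.contains q.2.1 then none else some (q.1, q.2.1, q.2.2)

def pvPrefP (preferred : List String) (o : String × String × Int) : Bool :=
  preferred.contains o.2.1

def pvMaxStep (acc : Option (String × String × Int)) (x : String × String × Int) :
    Option (String × String × Int) :=
  match acc with
  | none => some x
  | some m => if m.2.2 < x.2.2 then some x else some m

def pvMF (v : List (String × String × Int)) : Option (String × String × Int) :=
  v.foldl pvMaxStep none

def pvProj (o : Option (String × String × Int)) : Option (String × Int) :=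
  o.map (fun x => (x.1, x.2.2))

def pvABody (preferred : List String) (blacklisted : List String) (L : List (String × (String × Int))) : String :=
  let v := L.filterMap (pvValid1 blacklisted)
  if v = [] then "D"
  else
    let vp := v.filter (pvPrefP preferred)
    if vp ≠ [] then ((pvMF vp).getD ("", "", 0)).1
    else ((pvMF v).getD ("", "", 0)).1

theorem pvMax_eq (v : List (String × String × Int)) :
    PySem.List.max? v (fun x => x.2.2) = pvMF v := by
  simp only [PySem.List.max?, pvMF]
  congr 1
  funext acc x
  cases acc <;> rfl

theorem pvMF_some (t : List (String × String × Int)) :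
    ∀ m, ∃ r, t.foldl pvMaxStep (some m) = some r := by
  induction t with
  | nil => intro m; exact ⟨m, rfl⟩
  | cons x t ih =>
    intro m
    simp only [List.foldl_cons, pvMaxStep]
    split <;> apply ih

theorem pvMF_eq_none (v : List (String × String × Int)) : pvMF v = none ↔ v = [] := by
  cases v with
  | nil => simp [pvMF]
  | cons x t =>
    simp only [pvMF, List.foldl_cons, pvMaxStep]
    obtain ⟨r, hr⟩ := pvMF_some t x
    simp [hr]

theorem pvInvariant (preferred blacklisted : List String) (L : List (String × (String × Int))) :
    L.foldl (pvBStep preferred blacklisted) (none, none) =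
      (pvProj (pvMF ((L.filterMap (pvValid1 blacklisted)).filter (pvPrefP preferred))),
       pvProj (pvMF (L.filterMap (pvValid1 blacklisted)))) := by
  induction L using List.reverseRecOn with
  | nil => rfl
  | append_singleton L q ih =>
    rw [List.foldl_append, List.foldl_cons, List.foldl_nil, ih, List.filterMap_append]
    by_cases hb : q.2.1 ∈ blacklisted
    · have hfm : List.filterMap (pvValid1 blacklisted) [q] = [] := by
        simp [pvValid1, hb]
      simp [hfm, pvBStep, hb]
    · have hfm : List.filterMap (pvValid1 blacklisted) [q] = [(q.1, q.2.1, q.2.2)] := by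
        simp [pvValid1, hb]
      rw [hfm, List.filter_append]
      by_cases hp : q.2.1 ∈ preferred
      · have hfp : List.filter (pvPrefP preferred) [(q.1, q.2.1, q.2.2)] = [(q.1, q.2.1, q.2.2)] := by
          simp [pvPrefP, hp]
        rw [hfp]
        simp only [pvMF, List.foldl_append, List.foldl_cons, List.foldl_nil]
        cases hma : (L.filterMap (pvValid1 blacklisted)).foldl pvMaxStep none with
        | none =>
          have h0 : L.filterMap (pvValid1 blacklisted) = [] := (pvMF_eq_none _).1 (by simpa [pvMF] using hma)
          simp [h0, pvBStep, hb, hp, pvProj, pvMaxStep]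
        | some ma =>
          cases hmp : ((L.filterMap (pvValid1 blacklisted)).filter (pvPrefP preferred)).foldl pvMaxStep none with
          | none => simp [pvBStep, hb, hp, pvProj, pvMaxStep, hma, hmp] <;> split_ifs <;> rfl
          | some mp =>
            simp only [pvBStep, pvProj, pvMaxStep, hma, hmp, Option.map_some]
            simp [hb, hp]
            constructor <;> split_ifs <;> simp_all
      · have hfp : List.filter (pvPrefP preferred) [(q.1, q.2.1, q.2.2)] = [] := by
          simp [pvPrefP, hp]
        rw [hfp, List.append_nil]
        simp only [pvMF, List.foldl_append, List.foldl_cons, List.foldl_nil]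
        cases hma : (L.filterMap (pvValid1 blacklisted)).foldl pvMaxStep none with
        | none =>
          have h0 : L.filterMap (pvValid1 blacklisted) = [] := (pvMF_eq_none _).1 (by simpa [pvMF] using hma)
          simp [h0, pvBStep, hb, hp, pvProj, pvMaxStep]
        | some ma =>
          simp only [pvBStep, pvProj, pvMaxStep, hma, Option.map_some]
          simp [hb, hp]
          split_ifs <;> simp_all

theorem pvBody_eq (preferred blacklisted : List String) (L : List (String × (String × Int))) :
    pvABody preferred blacklisted L =
      (match (L.foldl (pvBStep preferred blacklisted) (none, none)).1 with
       | some b => b.1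
       | none =>
         match (L.foldl (pvBStep preferred blacklisted) (none, none)).2 with
         | some b => b.1
         | none => "D") := by
  rw [pvInvariant]
  simp only [pvABody]
  cases hv : pvMF (L.filterMap (pvValid1 blacklisted)) with
  | none =>
    have h1 : L.filterMap (pvValid1 blacklisted) = [] := (pvMF_eq_none _).1 hv
    have h2 : (L.filterMap (pvValid1 blacklisted)).filter (pvPrefP preferred) = [] := by
      simp [h1]
    simp [h1, pvProj, pvMF]
  | some ma =>
    have h1 : L.filterMap (pvValid1 blacklisted) ≠ [] := by
      intro h; rw [h] at hv; simp [pvMF] at hv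
    cases hvp : pvMF ((L.filterMap (pvValid1 blacklisted)).filter (pvPrefP preferred)) with
    | none =>
      have h2 : (L.filterMap (pvValid1 blacklisted)).filter (pvPrefP preferred) = [] :=
        (pvMF_eq_none _).1 hvp
      simp [h1, h2, pvProj]
    | some mp =>
      have h2 : (L.filterMap (pvValid1 blacklisted)).filter (pvPrefP preferred) ≠ [] := by
        intro h; rw [h] at hvp; simp [pvMF] at hvp
      simp [h1, h2, pvProj]


-- A's loop skips every blacklisted option, so an enumerated all-blacklisted tail leaves the accumulator unchanged
theorem pv_foldl_blacklisted_tail (blacklisted : List String)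
    (f : List (String × String × Int) → Int × (String × Int) → List (String × String × Int))
    (hf : ∀ acc p, blacklisted.contains p.2.1 = true → f acc p = acc)
    (l : List (String × Int)) (s : Int) (acc : List (String × String × Int))
    (hl : ∀ p ∈ l, blacklisted.contains p.1 = true) :
    (PySem.List.enumerate l s).foldl f acc = acc := by
  induction l generalizing s acc with
  | nil => simp [PySem.List.enumerate_nil]
  | cons x t ih =>
    rw [PySem.List.enumerate_cons, List.foldl_cons, hf acc (s, x) (hl x (by simp))]
    exact ih (s + 1) acc (fun p hp => hl p (by simp [hp]))

-- A on each shape of at most three options equals pvABody of the zipped list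
theorem pvA_shape0 (pref bl : List String) :
    choose_upgrade pref bl [] = pvABody pref bl (List.zip ["A", "B", "C"] []) := rfl

theorem pvA_shape1 (pref bl : List String) (a : String × Int) :
    choose_upgrade pref bl [a] = pvABody pref bl (List.zip ["A", "B", "C"] [a]) := by
  obtain ⟨s1, p1⟩ := a
  have hv : (PySem.List.enumerate [(s1, p1)]).foldl
      (fun acc p =>
        if ¬ bl.contains p.2.1 then
          acc ++ [(((PySem.List.pyGet? ["A", "B", "C"] p.1).getD ""), p.2.1, p.2.2)]
        else acc) [] = (List.zip ["A", "B", "C"] [(s1, p1)]).filterMap (pvValid1 bl) := by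
    by_cases hb1 : s1 ∈ bl <;>
      simp [PySem.List.enumerate_cons, PySem.List.enumerate_nil, pvValid1,
        PySem.List.pyGet?, PySem.List.pyIdx?, hb1]
  simp only [choose_upgrade, pvABody, pvMax_eq]
  rw [hv]
  rfl

theorem pvA_shape2 (pref bl : List String) (a b : String × Int) :
    choose_upgrade pref bl [a, b] = pvABody pref bl (List.zip ["A", "B", "C"] [a, b]) := by
  obtain ⟨s1, p1⟩ := a; obtain ⟨s2, p2⟩ := b
  have hv : (PySem.List.enumerate [(s1, p1), (s2, p2)]).foldl
      (fun acc p =>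
        if ¬ bl.contains p.2.1 then
          acc ++ [(((PySem.List.pyGet? ["A", "B", "C"] p.1).getD ""), p.2.1, p.2.2)]
        else acc) [] = (List.zip ["A", "B", "C"] [(s1, p1), (s2, p2)]).filterMap (pvValid1 bl) := by
    by_cases hb1 : s1 ∈ bl <;> by_cases hb2 : s2 ∈ bl <;>
      simp [PySem.List.enumerate_cons, PySem.List.enumerate_nil, pvValid1,
        PySem.List.pyGet?, PySem.List.pyIdx?, hb1, hb2]
  simp only [choose_upgrade, pvABody, pvMax_eq]
  rw [hv]
  rfl

theorem pvA_shape3 (pref bl : List String) (a b c : String × Int) :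
    choose_upgrade pref bl [a, b, c] = pvABody pref bl (List.zip ["A", "B", "C"] [a, b, c]) := by
  obtain ⟨s1, p1⟩ := a; obtain ⟨s2, p2⟩ := b; obtain ⟨s3, p3⟩ := c
  have hv : (PySem.List.enumerate [(s1, p1), (s2, p2), (s3, p3)]).foldl
      (fun acc p =>
        if ¬ bl.contains p.2.1 then
          acc ++ [(((PySem.List.pyGet? ["A", "B", "C"] p.1).getD ""), p.2.1, p.2.2)]
        else acc) [] = (List.zip ["A", "B", "C"] [(s1, p1), (s2, p2), (s3, p3)]).filterMap (pvValid1 bl) := by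
    by_cases hb1 : s1 ∈ bl <;> by_cases hb2 : s2 ∈ bl <;> by_cases hb3 : s3 ∈ bl <;>
      simp [PySem.List.enumerate_cons, PySem.List.enumerate_nil, pvValid1,
        PySem.List.pyGet?, PySem.List.pyIdx?, hb1, hb2, hb3]
  simp only [choose_upgrade, pvABody, pvMax_eq]
  rw [hv]
  rfl

-- B's match-expression is its definition on the zipped list
theorem pvAlt_eq (pref bl : List String) (o : List (String × Int)) :
    choose_upgrade_alt pref bl o =
      (match ((List.zip ["A", "B", "C"] o).foldl (pvBStep pref bl) (none, none)).1 with
       | some b => b.1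
       | none =>
         match ((List.zip ["A", "B", "C"] o).foldl (pvBStep pref bl) (none, none)).2 with
         | some b => b.1
         | none => "D") := rfl

theorem pvEq0 (pref bl : List String) :
    choose_upgrade pref bl [] = choose_upgrade_alt pref bl [] := by
  rw [pvA_shape0, pvBody_eq, pvAlt_eq]

theorem pvEq1 (pref bl : List String) (a : String × Int) :
    choose_upgrade pref bl [a] = choose_upgrade_alt pref bl [a] := by
  rw [pvA_shape1, pvBody_eq, pvAlt_eq]

theorem pvEq2 (pref bl : List String) (a b : String × Int) :
    choose_upgrade pref bl [a, b] = choose_upgrade_alt pref bl [a, b] := by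
  rw [pvA_shape2, pvBody_eq, pvAlt_eq]

theorem pvEq3 (pref bl : List String) (a b c : String × Int) :
    choose_upgrade pref bl [a, b, c] = choose_upgrade_alt pref bl [a, b, c] := by
  rw [pvA_shape3, pvBody_eq, pvAlt_eq]

-- dropping an all-blacklisted tail after the first three options does not change A
theorem pvA_long (pref bl : List String) (a b c : String × Int) (rest : List (String × Int))
    (h : ∀ p ∈ rest, bl.contains p.1 = true) :
    choose_upgrade pref bl (a :: b :: c :: rest) = choose_upgrade pref bl [a, b, c] := by
  have hf : ∀ (acc : List (String × String × Int)) (p : Int × (String × Int)),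
      bl.contains p.2.1 = true →
      (if ¬ bl.contains p.2.1 then
          acc ++ [(((PySem.List.pyGet? ["A", "B", "C"] p.1).getD ""), p.2.1, p.2.2)]
        else acc) = acc := by
    intro acc p hbp
    have hm : p.2.1 ∈ bl := by simpa using hbp
    simp [hm]
  simp only [choose_upgrade]
  rw [show (a :: b :: c :: rest) = [a, b, c] ++ rest from rfl, PySem.List.enumerate_append,
    List.foldl_append, pv_foldl_blacklisted_tail bl _ hf rest _ _ h]

-- ===== VERDICT (by name: the statement is the Claim_ definition above) =====
theorem choose_upgrade_spec : Claim_equal_choose_upgrade := by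
  intro preferred blacklisted options _ hpre
  unfold Spec_choose_upgrade
  match options with
  | [] => exact pvEq0 preferred blacklisted
  | [a] => exact pvEq1 preferred blacklisted a
  | [a, b] => exact pvEq2 preferred blacklisted a b
  | [a, b, c] => exact pvEq3 preferred blacklisted a b c
  | a :: b :: c :: d :: rest =>
    have h : ∀ p ∈ (d :: rest), blacklisted.contains p.1 = true := by
      intro p hp
      exact hpre p (by simpa using hp)
    calc choose_upgrade preferred blacklisted (a :: b :: c :: d :: rest)
        = choose_upgrade preferred blacklisted [a, b, c] := pvA_long preferred blacklisted a b c (d :: rest) h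
      _ = choose_upgrade_alt preferred blacklisted [a, b, c] := pvEq3 preferred blacklisted a b c
      _ = choose_upgrade_alt preferred blacklisted (a :: b :: c :: d :: rest) := rfl
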